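-- pv_equiv track=rewrite | github.com/logstar/NET-seq-CLT | src/count_fastq_match_len.py | all_same_mlen_range
-- ===== SOURCE A (Python) =====
-- def all_same_mlen_range(tseq_mlen_cnt_list):
--     if len(tseq_mlen_cnt_list) == 0:
--         return True
--
--     mlen_tup = tuple(map(lambda t: t[0], tseq_mlen_cnt_list[0][1:]))
--
--     # assert all matched length ranges are the same
--     for tseq_mlen_cnt in tseq_mlen_cnt_list:
--         tseq_mlen_tup = tuple(map(lambda t: t[0], tseq_mlen_cnt[1:]))
--         if tseq_mlen_tup != mlen_tup:
--             return False
--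
--     return True
-- ===== SOURCE B (Python) =====
-- def all_same_mlen_range(tseq_mlen_cnt_list):
--     # Column-wise (transposed) check: first verify all trimmed rows have the same
--     # length, then compare the first components one column at a time.
--     rows = [e[1:] for e in tseq_mlen_cnt_list]
--     if not rows:
--         return True
--     m = len(rows[0])
--     if any(len(r) != m for r in rows):
--         return False
--     for j in range(m):
--         c0 = rows[0][j][0]
--         if any(r[j][0] != c0 for r in rows):
--             return False
--     return True
-- ===== Notes on version B (the rewrite author's own statement) =====
-- stated objective: alternative
-- what changed: Replaces A's row-wise loop comparing each derived key tuple to a reference tuple by a transposed, column-wise check: first verify all trimmed rows have equal length, then compare the first components one column at a time across all rows.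
import Mathlib
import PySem

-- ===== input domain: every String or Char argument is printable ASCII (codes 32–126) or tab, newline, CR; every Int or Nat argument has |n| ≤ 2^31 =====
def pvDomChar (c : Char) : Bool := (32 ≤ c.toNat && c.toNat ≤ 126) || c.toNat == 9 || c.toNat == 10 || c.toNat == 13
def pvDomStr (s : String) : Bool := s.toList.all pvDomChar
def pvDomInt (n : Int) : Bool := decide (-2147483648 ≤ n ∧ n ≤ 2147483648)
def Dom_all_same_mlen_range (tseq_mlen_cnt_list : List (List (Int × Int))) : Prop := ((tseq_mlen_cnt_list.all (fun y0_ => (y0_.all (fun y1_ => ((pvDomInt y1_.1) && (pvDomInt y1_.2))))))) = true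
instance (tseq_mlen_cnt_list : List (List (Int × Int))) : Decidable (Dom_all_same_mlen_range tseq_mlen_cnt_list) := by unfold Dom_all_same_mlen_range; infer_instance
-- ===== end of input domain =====

-- B replaces A's row-wise compare-to-reference-tuple loop by a transposed, column-wise
-- check (equal trimmed lengths first, then one column of first components at a time);
-- objective: alternative traversal order, same cost.

-- ===== PORT A =====
-- tuple(map(lambda t: t[0], e[1:]))
def mlenKey (e : List (Int × Int)) : List Int :=
  (PySem.List.slice e (some 1) none).map Prod.fst

-- A's for-loop with its early 'return False'
def mlenLoopA (mlen : List Int) : List (List (Int × Int)) → Bool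
  | [] => true
  | e :: rest => if mlenKey e ≠ mlen then false else mlenLoopA mlen rest

def all_same_mlen_range (tseq_mlen_cnt_list : List (List (Int × Int))) : Bool :=
  match tseq_mlen_cnt_list with
  | [] => true
  | first :: _ => mlenLoopA (mlenKey first) tseq_mlen_cnt_list

-- ===== PORT B =====
-- rows = [e[1:] for e in tseq_mlen_cnt_list]; then the length check, then the column
-- loop over range(m) (the final 'return True' is the trailing 'all').
-- rows[0] and r[j] never raise in Python here (rows nonempty, 0 ≤ j < len(r) after the
-- length check), so headD / pyGet? ... |>.getD are exact on every reached index.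
def all_same_mlen_range_alt (tseq_mlen_cnt_list : List (List (Int × Int))) : Bool :=
  let rows := tseq_mlen_cnt_list.map (fun e => PySem.List.slice e (some 1) none)
  if rows.isEmpty then true
  else
    let r0 := rows.headD []
    let m : Int := r0.length
    if rows.any (fun r => (r.length : Int) ≠ m) then false
    else
      (PySem.List.pyRange 0 m 1).all (fun j =>
        let c0 := ((PySem.List.pyGet? r0 j).getD (0, 0)).1
        !(rows.any (fun r => ((PySem.List.pyGet? r j).getD (0, 0)).1 ≠ c0)))

-- ===== PRECONDITION & SPEC =====
def Spec_all_same_mlen_range (tseq_mlen_cnt_list : List (List (Int × Int))) (out : Bool) : Prop := out = all_same_mlen_range_alt tseq_mlen_cnt_list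
instance (tseq_mlen_cnt_list : List (List (Int × Int))) (out : Bool) : Decidable (Spec_all_same_mlen_range tseq_mlen_cnt_list out) := by unfold Spec_all_same_mlen_range; infer_instance

-- ===== CLAIM (what is proved, stated in full; the proofs are below) =====
def Claim_equal_all_same_mlen_range : Prop := ∀ (tseq_mlen_cnt_list : List (List (Int × Int))), Dom_all_same_mlen_range tseq_mlen_cnt_list → Spec_all_same_mlen_range tseq_mlen_cnt_list (all_same_mlen_range tseq_mlen_cnt_list)

-- ===== LEMMAS AND PROOFS =====

-- A's loop is an 'all' over the list
theorem mlenLoopA_eq_all (k : List Int) (l : List (List (Int × Int))) :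
    mlenLoopA k l = l.all (fun e => mlenKey e == k) := by
  induction l with
  | nil => rfl
  | cons e rest ih =>
    simp only [mlenLoopA, List.all_cons, ih]
    by_cases h : mlenKey e = k <;> simp [h]

-- componentwise characterization of key equality
theorem map_fst_eq_iff (r r0 : List (Int × Int)) :
    r.map Prod.fst = r0.map Prod.fst ↔
      r.length = r0.length ∧
        ∀ k : Nat, k < r0.length → (r[k]?.getD (0, 0)).1 = (r0[k]?.getD (0, 0)).1 := by
  constructor
  · intro h
    have hl : r.length = r0.length := by
      have := congrArg List.length h; simpa using this
    refine ⟨hl, fun k hk => ?_⟩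
    have hk' : k < r.length := by omega
    have := congrArg (fun l => l[k]?) h
    simp only [List.getElem?_map] at this
    rw [List.getElem?_eq_getElem hk', List.getElem?_eq_getElem hk] at this ⊢
    simpa using this
  · rintro ⟨hl, h⟩
    apply List.ext_getElem (by simpa using hl)
    intro i h1 h2
    simp only [List.length_map] at h1 h2
    have := h i h2
    rw [List.getElem?_eq_getElem (by omega), List.getElem?_eq_getElem h2] at this
    simpa using this

-- the transposed check computes A's 'all keys equal the first key'
theorem alt_eq_all (first : List (Int × Int)) (rest : List (List (Int × Int))) :
    all_same_mlen_range_alt (first :: rest)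
      = (first :: rest).all (fun e => mlenKey e == mlenKey first) := by
  unfold all_same_mlen_range_alt
  simp only [List.map_cons, List.isEmpty_cons, Bool.false_eq_true, if_false,
    List.headD_cons, mlenKey, PySem.List.slice_from_one]
  rw [Bool.eq_iff_iff]
  simp only [List.all_cons, beq_self_eq_true, Bool.true_and, List.all_eq_true, beq_iff_eq]
  by_cases hA : ∃ r ∈ first.tail :: rest.map List.tail, (r.length : Int) ≠ (first.tail.length : Int)
  · rw [if_pos (by simpa [List.any_eq_true] using hA)]
    obtain ⟨r, hr, hner⟩ := hA
    constructor
    · intro hfalse; cases hfalse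
    · intro hL
      exfalso
      rcases List.mem_cons.mp hr with h0 | hmem
      · exact hner (by rw [h0])
      · obtain ⟨e, he, rfl⟩ := List.mem_map.mp hmem
        have := hL e he
        have : e.tail.length = first.tail.length := by
          have := congrArg List.length this; simpa using this
        exact hner (by exact_mod_cast this)
  · rw [if_neg (by simpa [List.any_eq_true] using hA)]
    push Not at hA
    have hlen : ∀ e ∈ rest, e.tail.length = first.tail.length := by
      intro e he
      have := hA e.tail (List.mem_cons_of_mem _ (List.mem_map_of_mem he))
      exact_mod_cast this
    simp only [List.all_eq_true, PySem.List.mem_pyRange_one, Bool.not_eq_eq_eq_not,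
      Bool.not_true, List.any_eq_false, List.mem_cons, List.mem_map]
    constructor
    · -- column checks pass → every key equals the first key
      intro hR e he
      refine (map_fst_eq_iff e.tail first.tail).mpr ⟨hlen e he, fun k hk => ?_⟩
      have hj : (0 : Int) ≤ (k : Int) ∧ (k : Int) < (first.tail.length : Int) := by
        constructor
        · exact Int.natCast_nonneg k
        · exact_mod_cast hk
      have := hR (k : Int) hj
      have hcol := this e.tail (Or.inr ⟨e, he, rfl⟩)
      simp only [decide_eq_true_eq, ne_eq, not_not, PySem.List.pyGet?_natCast] at hcol
      exact hcol
    · -- every key equals the first key → every column check passes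
      intro hL j hj r hr
      rcases hr with h0 | ⟨e, he, rfl⟩
      · rw [h0]; simp
      · have hkey : e.tail.map Prod.fst = first.tail.map Prod.fst := hL e he
        have hcomp := ((map_fst_eq_iff e.tail first.tail).mp hkey).2 j.toNat
          (by omega)
        intro hne
        rw [decide_eq_true_eq] at hne
        exact hne (by
          rw [PySem.List.pyGet?_of_nonneg _ hj.1, PySem.List.pyGet?_of_nonneg _ hj.1]
          exact hcomp)

-- ===== VERDICT (by name: the statement is the Claim_ definition above) =====
theorem all_same_mlen_range_spec : Claim_equal_all_same_mlen_range := by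
  intro xs _
  unfold Spec_all_same_mlen_range
  match xs with
  | [] => rfl
  | first :: rest =>
    have hA : all_same_mlen_range (first :: rest)
        = mlenLoopA (mlenKey first) (first :: rest) := rfl
    rw [hA, mlenLoopA_eq_all, alt_eq_all]
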